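-- pv_equiv track=rewrite | github.com/ItsRichPoorGirl/RPGAgent | backend/agent/tools/imagen_prompt_enhancer.py | optimize_prompt_length
-- ===== SOURCE A (Python) =====
-- def optimize_prompt_length(prompt: str, max_length: int = 400) -> str:
--     """Optimize prompt length while preserving key information."""
--     if len(prompt) <= max_length:
--         return prompt
--
--     # Split into components
--     parts = [part.strip() for part in prompt.split(",")]
--
--     # Keep the most important parts (first part is usually the main subject)
--     essential_parts = parts[:1]  # Always keep the main subject
--     optional_parts = parts[1:]
--
--     # Add optional parts while staying under limit
--     current_prompt = essential_parts[0]
--     for part in optional_parts: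
--         test_prompt = current_prompt + ", " + part
--         if len(test_prompt) <= max_length:
--             current_prompt = test_prompt
--         else:
--             break
--
--     return current_prompt
-- ===== SOURCE B (Python) =====
-- def optimize_prompt_length(prompt: str, max_length: int = 400) -> str:
--     """Optimize prompt length while preserving key information."""
--     if len(prompt) <= max_length:
--         return prompt
--
--     parts = [part.strip() for part in prompt.split(",")]
--
--     # Cumulative-length table: cum[i] = len(", ".join(parts[:i+1]))
--     cum = []
--     total = -2
--     for p in parts:
--         total += 2 + len(p)
--         cum.append(total)
--
--     # Largest k (>= 1: the main subject is always kept) such that the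
--     # first k parts joined fit; cum is strictly increasing, so the first
--     # overflow ends the scan exactly like A's break.
--     k = 1
--     for c in cum[1:]:
--         if c <= max_length:
--             k += 1
--         else:
--             break
--
--     return ", ".join(parts[:k])
-- ===== Notes on version B (the rewrite author's own statement) =====
-- stated objective: alternative
-- what changed: Replaces A's incremental string concatenation loop (rebuilding the candidate prompt each step) with a cumulative-length table plus a cutoff index and a single final join.
import Mathlib
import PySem

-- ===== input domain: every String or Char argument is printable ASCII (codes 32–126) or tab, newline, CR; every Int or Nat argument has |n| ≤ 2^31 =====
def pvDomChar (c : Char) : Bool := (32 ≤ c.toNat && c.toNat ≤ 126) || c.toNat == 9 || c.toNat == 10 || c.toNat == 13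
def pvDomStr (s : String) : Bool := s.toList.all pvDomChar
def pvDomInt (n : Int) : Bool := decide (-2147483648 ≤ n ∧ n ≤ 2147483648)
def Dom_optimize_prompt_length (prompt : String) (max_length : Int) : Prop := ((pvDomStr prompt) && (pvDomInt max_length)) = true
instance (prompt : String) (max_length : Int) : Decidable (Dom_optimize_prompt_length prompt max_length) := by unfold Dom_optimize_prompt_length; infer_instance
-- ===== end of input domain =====

-- B replaces A's incremental concatenation loop with a cumulative-length table, a cutoff index and one final join (alternative decomposition, same results).

-- ===== PORT A =====
-- the 'for part in optional_parts: … break' loop of A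
def pvLoopA (m : Int) : List Char → List (List Char) → List Char
  | cur, [] => cur
  | cur, p :: ps =>
    let t := cur ++ [',', ' '] ++ p
    if PySem.Chars.len t ≤ m then pvLoopA m t ps else cur

def optimize_prompt_length (prompt : String) (max_length : Int) : String :=
  if PySem.Str.len prompt ≤ max_length then prompt
  else
    let parts := (PySem.Chars.splitOn prompt.toList [',']).map PySem.Chars.strip
    let essential_parts := parts.take 1
    let optional_parts := parts.drop 1
    -- essential_parts[0]: split always yields at least one part, so the index is in range
    String.ofList (pvLoopA max_length (PySem.List.pyGetD essential_parts 0 []) optional_parts)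

-- ===== PORT B =====
-- the cumulative-table loop of B ('total += 2 + len(p); cum.append(total)')
def pvCumB : List (List Char) → Int → List Int → List Int
  | [], _, cum => cum
  | p :: ps, total, cum =>
    let t := total + 2 + PySem.Chars.len p
    pvCumB ps t (cum ++ [t])

-- the cutoff scan of B ('for c in cum[1:]: if c <= max_length: k += 1 else: break')
def pvCutB (m : Int) : List Int → Nat → Nat
  | [], k => k
  | c :: cs, k => if c ≤ m then pvCutB m cs (k + 1) else k

def optimize_prompt_length_alt (prompt : String) (max_length : Int) : String :=
  if PySem.Str.len prompt ≤ max_length then prompt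
  else
    let parts := (PySem.Chars.splitOn prompt.toList [',']).map PySem.Chars.strip
    let cum := pvCumB parts (-2) []
    let k := pvCutB max_length (cum.drop 1) 1
    String.ofList (PySem.Chars.join [',', ' '] (parts.take k))

-- ===== PRECONDITION & SPEC =====
def Spec_optimize_prompt_length (prompt : String) (max_length : Int) (out : String) : Prop := out = optimize_prompt_length_alt prompt max_length
instance (prompt : String) (max_length : Int) (out : String) : Decidable (Spec_optimize_prompt_length prompt max_length out) := by unfold Spec_optimize_prompt_length; infer_instance

-- ===== CLAIM (what is proved, stated in full; the proofs are below) =====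
def Claim_equal_optimize_prompt_length : Prop := ∀ (prompt : String) (max_length : Int), Dom_optimize_prompt_length prompt max_length → Spec_optimize_prompt_length prompt max_length (optimize_prompt_length prompt max_length)

-- ===== LEMMAS AND PROOFS =====

-- the cumulative table without B's accumulator: entry i is (running total after part i)
def pvCumTail (t : Int) : List (List Char) → List Int
  | [] => []
  | p :: ps => (t + 2 + PySem.Chars.len p) :: pvCumTail (t + 2 + PySem.Chars.len p) ps

theorem pvCumB_eq (ps : List (List Char)) : ∀ (t : Int) (acc : List Int),
    pvCumB ps t acc = acc ++ pvCumTail t ps := by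
  induction ps with
  | nil => intro t acc; simp [pvCumB, pvCumTail]
  | cons p ps ih => intro t acc; simp [pvCumB, pvCumTail, ih]

theorem pvCutB_eq (m : Int) (cs : List Int) : ∀ (k : Nat),
    pvCutB m cs k = k + (cs.takeWhile (fun c => decide (c ≤ m))).length := by
  induction cs with
  | nil => intro k; simp [pvCutB]
  | cons c cs ih =>
    intro k
    by_cases h : c ≤ m
    · simp [pvCutB, h, ih]; omega
    · simp [pvCutB, h]

theorem pvJoin_head_append (a b : List Char) (l : List (List Char)) :
    PySem.Chars.join [',', ' '] ((a ++ [',', ' '] ++ b) :: l)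
      = a ++ [',', ' '] ++ PySem.Chars.join [',', ' '] (b :: l) := by
  cases l with
  | nil => simp [PySem.Chars.join_singleton]
  | cons c cs => simp [PySem.Chars.join_cons_cons]

theorem pvLoopA_eq (m : Int) (ps : List (List Char)) : ∀ (cur : List Char),
    pvLoopA m cur ps =
      PySem.Chars.join [',', ' ']
        (cur :: ps.take ((pvCumTail (PySem.Chars.len cur) ps).takeWhile
          (fun c => decide (c ≤ m))).length) := by
  induction ps with
  | nil => intro cur; simp [pvLoopA, PySem.Chars.join_singleton]
  | cons p ps ih =>
    intro cur
    have hlen : PySem.Chars.len (cur ++ [',', ' '] ++ p)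
        = PySem.Chars.len cur + 2 + PySem.Chars.len p := by
      simp [PySem.Chars.len_eq]; ring
    have hcum : pvCumTail (PySem.Chars.len cur) (p :: ps)
        = (PySem.Chars.len cur + 2 + PySem.Chars.len p)
            :: pvCumTail (PySem.Chars.len cur + 2 + PySem.Chars.len p) ps := rfl
    by_cases h : PySem.Chars.len cur + 2 + PySem.Chars.len p ≤ m
    · have e1 : pvLoopA m cur (p :: ps) = pvLoopA m (cur ++ [',', ' '] ++ p) ps := by
        simp only [pvLoopA, hlen]; rw [if_pos h]
      rw [e1, ih (cur ++ [',', ' '] ++ p), hlen, hcum,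
        List.takeWhile_cons_of_pos (by simpa using h), List.length_cons,
        List.take_succ_cons]
      rw [PySem.Chars.join_cons_cons]
      exact pvJoin_head_append cur p _
    · have e1 : pvLoopA m cur (p :: ps) = cur := by
        simp only [pvLoopA, hlen]; rw [if_neg h]
      rw [e1, hcum, List.takeWhile_cons_of_neg (by simpa using h)]
      simp [PySem.Chars.join_singleton]

-- ===== VERDICT (by name: the statement is the Claim_ definition above) =====
theorem optimize_prompt_length_spec : Claim_equal_optimize_prompt_length := by
  intro prompt max_length _
  unfold Spec_optimize_prompt_length optimize_prompt_length optimize_prompt_length_alt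
  by_cases h : PySem.Str.len prompt ≤ max_length
  · rw [if_pos h, if_pos h]
  · rw [if_neg h, if_neg h]
    cases hp : (PySem.Chars.splitOn prompt.toList [',']).map PySem.Chars.strip with
    | nil =>
      dsimp only
      simp [pvLoopA, pvCumB, pvCutB, PySem.Chars.join, PySem.List.pyGetD,
        PySem.List.pyGet?, List.intercalate]
    | cons q qs =>
      dsimp only
      rw [pvCumB_eq]
      simp only [List.nil_append, pvCumTail, List.drop_succ_cons, List.drop_zero]
      rw [pvCutB_eq]
      have h2 : (-2 : Int) + 2 + PySem.Chars.len q = PySem.Chars.len q := by ring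
      rw [h2]
      rw [Nat.add_comm, List.take_succ_cons]
      rw [pvLoopA_eq]
      simp [PySem.List.pyGetD_zero_cons]
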